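-- pv_equiv track=rewrite | github.com/Jose-Bohorquez/AdvancedPhisher | core/reports.py | _analyze_user_agents
-- ===== SOURCE A (Python) =====
-- from typing import Dict, List, Any, Optional
-- from collections import Counter, defaultdict
--
-- def _analyze_user_agents(visits: List[Dict]) -> Dict:
--     """Analizar User Agents"""
--     browsers = defaultdict(int)
--     os_systems = defaultdict(int)
--     devices = defaultdict(int)
--
--     for visit in visits:
--         ua = visit.get('user_agent', '')
--         if ua:
--             # An치lisis b치sico de User Agent
--             if 'Chrome' in ua:
--                 browsers['Chrome'] += 1
--             elif 'Firefox' in ua: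
--                 browsers['Firefox'] += 1
--             elif 'Safari' in ua:
--                 browsers['Safari'] += 1
--             elif 'Edge' in ua:
--                 browsers['Edge'] += 1
--             else:
--                 browsers['Other'] += 1
--
--             if 'Windows' in ua:
--                 os_systems['Windows'] += 1
--             elif 'Mac' in ua:
--                 os_systems['macOS'] += 1
--             elif 'Linux' in ua:
--                 os_systems['Linux'] += 1
--             elif 'Android' in ua:
--                 os_systems['Android'] += 1
--             elif 'iOS' in ua:
--                 os_systems['iOS'] += 1
--             else:
--                 os_systems['Other'] += 1
--
--             if 'Mobile' in ua:
--                 devices['Mobile'] += 1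
--             elif 'Tablet' in ua:
--                 devices['Tablet'] += 1
--             else:
--                 devices['Desktop'] += 1
--
--     return {
--         'browsers': dict(browsers),
--         'operating_systems': dict(os_systems),
--         'devices': dict(devices)
--     }
-- ===== SOURCE B (Python) =====
-- from typing import Dict, List, Any, Optional
--
-- _BROWSER_RULES = [('Chrome', 'Chrome'), ('Firefox', 'Firefox'),
--                   ('Safari', 'Safari'), ('Edge', 'Edge')]
-- _OS_RULES = [('Windows', 'Windows'), ('Mac', 'macOS'), ('Linux', 'Linux'),
--              ('Android', 'Android'), ('iOS', 'iOS')]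
-- _DEVICE_RULES = [('Mobile', 'Mobile'), ('Tablet', 'Tablet')]
--
--
-- def _label(ua, rules, default):
--     for kw, lab in rules:
--         if kw in ua:
--             return lab
--     return default
--
--
-- def _tally(labels):
--     # counts in first-occurrence order, without any running counter
--     return {lab: labels.count(lab) for lab in dict.fromkeys(labels)}
--
--
-- def _analyze_user_agents(visits: List[Dict]) -> Dict:
--     # staged pipeline: extract -> three label lists -> tally each
--     uas = [ua for ua in (v.get('user_agent', '') for v in visits) if ua]
--     browsers = [_label(ua, _BROWSER_RULES, 'Other') for ua in uas]
--     os_systems = [_label(ua, _OS_RULES, 'Other') for ua in uas]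
--     devices = [_label(ua, _DEVICE_RULES, 'Desktop') for ua in uas]
--     return {
--         'browsers': _tally(browsers),
--         'operating_systems': _tally(os_systems),
--         'devices': _tally(devices)
--     }
-- ===== Notes on version B (the rewrite author's own statement) =====
-- stated objective: alternative
-- what changed: Replaces A's single pass with three mutable running counters by a staged pipeline that maintains no counters at all: extract the non-empty user agents, map them to three label lists, then tally each list by pairing its first-occurrence dedup with labels.count(lab).
import Mathlib
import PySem

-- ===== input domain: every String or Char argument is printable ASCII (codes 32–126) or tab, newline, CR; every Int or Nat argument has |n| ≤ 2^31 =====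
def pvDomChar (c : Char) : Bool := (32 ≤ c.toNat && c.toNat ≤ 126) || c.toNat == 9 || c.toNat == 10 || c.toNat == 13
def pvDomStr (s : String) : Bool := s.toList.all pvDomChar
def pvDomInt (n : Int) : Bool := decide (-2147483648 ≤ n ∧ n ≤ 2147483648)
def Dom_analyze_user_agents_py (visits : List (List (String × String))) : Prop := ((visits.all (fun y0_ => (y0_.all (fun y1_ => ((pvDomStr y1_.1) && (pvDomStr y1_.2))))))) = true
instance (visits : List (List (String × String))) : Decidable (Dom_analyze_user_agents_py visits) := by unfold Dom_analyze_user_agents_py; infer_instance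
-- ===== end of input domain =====

-- B replaces A's single pass with three running counters by a staged pipeline with
-- no counters: extract user agents, map to label lists, tally by dedup + count.

-- visit.get('user_agent', '') — first match in the association list
def pvGetUA (visit : List (String × String)) : String :=
  ((visit.find? (fun p => p.1 == "user_agent")).map Prod.snd).getD ""

-- ===== PORT A =====
-- counter[k] += 1 (defaultdict(int) increment)
def pvInc (d : PySem.Dict String Int) (k : String) : PySem.Dict String Int :=
  d.modify k 0 (· + 1)

-- one visit of A's loop: three hard-coded if/elif chains over three mutable dicts
def pvAStep (st : PySem.Dict String Int × PySem.Dict String Int × PySem.Dict String Int)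
    (visit : List (String × String)) :
    PySem.Dict String Int × PySem.Dict String Int × PySem.Dict String Int :=
  let ua := pvGetUA visit
  if ua = "" then st
  else
    let b :=
      if PySem.Str.isIn "Chrome" ua then pvInc st.1 "Chrome"
      else if PySem.Str.isIn "Firefox" ua then pvInc st.1 "Firefox"
      else if PySem.Str.isIn "Safari" ua then pvInc st.1 "Safari"
      else if PySem.Str.isIn "Edge" ua then pvInc st.1 "Edge"
      else pvInc st.1 "Other"
    let o :=
      if PySem.Str.isIn "Windows" ua then pvInc st.2.1 "Windows"
      else if PySem.Str.isIn "Mac" ua then pvInc st.2.1 "macOS"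
      else if PySem.Str.isIn "Linux" ua then pvInc st.2.1 "Linux"
      else if PySem.Str.isIn "Android" ua then pvInc st.2.1 "Android"
      else if PySem.Str.isIn "iOS" ua then pvInc st.2.1 "iOS"
      else pvInc st.2.1 "Other"
    let d :=
      if PySem.Str.isIn "Mobile" ua then pvInc st.2.2 "Mobile"
      else if PySem.Str.isIn "Tablet" ua then pvInc st.2.2 "Tablet"
      else pvInc st.2.2 "Desktop"
    (b, o, d)

def analyze_user_agents_py (visits : List (List (String × String))) : List (String × List (String × Int)) :=
  let st := visits.foldl pvAStep (PySem.Dict.empty, PySem.Dict.empty, PySem.Dict.empty)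
  [("browsers", st.1.items), ("operating_systems", st.2.1.items), ("devices", st.2.2.items)]

-- ===== PORT B =====
def pvBrowserRules : List (String × String) :=
  [("Chrome", "Chrome"), ("Firefox", "Firefox"), ("Safari", "Safari"), ("Edge", "Edge")]
def pvOsRules : List (String × String) :=
  [("Windows", "Windows"), ("Mac", "macOS"), ("Linux", "Linux"), ("Android", "Android"), ("iOS", "iOS")]
def pvDeviceRules : List (String × String) :=
  [("Mobile", "Mobile"), ("Tablet", "Tablet")]

-- label of the first rule whose keyword is a substring of ua, else default
def pvLabel (ua : String) (rules : List (String × String)) (dflt : String) : String :=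
  match rules with
  | [] => dflt
  | (kw, lab) :: rest => if PySem.Str.isIn kw ua then lab else pvLabel ua rest dflt

-- {lab: labels.count(lab) for lab in dict.fromkeys(labels)}
def pvTally (labels : List String) : List (String × Int) :=
  (PySem.List.dedup labels).map (fun l => (l, (labels.count l : Int)))

def analyze_user_agents_py_alt (visits : List (List (String × String))) : List (String × List (String × Int)) :=
  let uas := (visits.map pvGetUA).filter (fun ua => ua ≠ "")
  let browsers := uas.map (fun ua => pvLabel ua pvBrowserRules "Other")
  let os_systems := uas.map (fun ua => pvLabel ua pvOsRules "Other")
  let devices := uas.map (fun ua => pvLabel ua pvDeviceRules "Desktop")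
  [("browsers", pvTally browsers), ("operating_systems", pvTally os_systems),
   ("devices", pvTally devices)]

-- ===== PRECONDITION & SPEC =====
def Spec_analyze_user_agents_py (visits : List (List (String × String))) (out : List (String × List (String × Int))) : Prop := out = analyze_user_agents_py_alt visits
instance (visits : List (List (String × String))) (out : List (String × List (String × Int))) : Decidable (Spec_analyze_user_agents_py visits out) := by unfold Spec_analyze_user_agents_py; infer_instance

-- ===== CLAIM (what is proved, stated in full; the proofs are below) =====
def Claim_equal_analyze_user_agents_py : Prop := ∀ (visits : List (List (String × String))), Dom_analyze_user_agents_py visits → Spec_analyze_user_agents_py visits (analyze_user_agents_py visits)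

-- ===== LEMMAS AND PROOFS =====
theorem browser_chain (d : PySem.Dict String Int) (ua : String) :
    (if PySem.Str.isIn "Chrome" ua then pvInc d "Chrome"
     else if PySem.Str.isIn "Firefox" ua then pvInc d "Firefox"
     else if PySem.Str.isIn "Safari" ua then pvInc d "Safari"
     else if PySem.Str.isIn "Edge" ua then pvInc d "Edge"
     else pvInc d "Other") = pvInc d (pvLabel ua pvBrowserRules "Other") := by
  simp only [pvLabel, pvBrowserRules]; split_ifs <;> rfl

theorem os_chain (d : PySem.Dict String Int) (ua : String) :
    (if PySem.Str.isIn "Windows" ua then pvInc d "Windows"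
     else if PySem.Str.isIn "Mac" ua then pvInc d "macOS"
     else if PySem.Str.isIn "Linux" ua then pvInc d "Linux"
     else if PySem.Str.isIn "Android" ua then pvInc d "Android"
     else if PySem.Str.isIn "iOS" ua then pvInc d "iOS"
     else pvInc d "Other") = pvInc d (pvLabel ua pvOsRules "Other") := by
  simp only [pvLabel, pvOsRules]; split_ifs <;> rfl

theorem device_chain (d : PySem.Dict String Int) (ua : String) :
    (if PySem.Str.isIn "Mobile" ua then pvInc d "Mobile"
     else if PySem.Str.isIn "Tablet" ua then pvInc d "Tablet"
     else pvInc d "Desktop") = pvInc d (pvLabel ua pvDeviceRules "Desktop") := by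
  simp only [pvLabel, pvDeviceRules]; split_ifs <;> rfl

-- A's interleaved fold splits into three independent folds over the non-empty uas
theorem foldA_split (visits : List (List (String × String)))
    (d1 d2 d3 : PySem.Dict String Int) :
    visits.foldl pvAStep (d1, d2, d3) =
      (((visits.map pvGetUA).filter (fun ua => ua ≠ "")).foldl
          (fun d ua => pvInc d (pvLabel ua pvBrowserRules "Other")) d1,
       ((visits.map pvGetUA).filter (fun ua => ua ≠ "")).foldl
          (fun d ua => pvInc d (pvLabel ua pvOsRules "Other")) d2,
       ((visits.map pvGetUA).filter (fun ua => ua ≠ "")).foldl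
          (fun d ua => pvInc d (pvLabel ua pvDeviceRules "Desktop")) d3) := by
  induction visits generalizing d1 d2 d3 with
  | nil => rfl
  | cons v vs ih =>
    simp only [List.map_cons, List.filter_cons, List.foldl_cons]
    by_cases h : pvGetUA v = ""
    · simp only [pvAStep, h, decide_eq_true_eq]
      simp [ih]
    · simp only [pvAStep, if_neg h]
      rw [browser_chain, os_chain, device_chain]
      simp only [ne_eq, h, not_false_eq_true, decide_true]
      exact ih _ _ _

-- a counting fold's items are exactly the dedup-plus-count tally
theorem foldl_inc_items (labels : List String) :
    (labels.foldl (fun d l => pvInc d l) PySem.Dict.empty).items = pvTally labels := by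
  have h : labels.foldl (fun d l => pvInc d l) PySem.Dict.empty
      = PySem.Dict.counter labels := by
    rw [PySem.Dict.counter_eq_foldl]; rfl
  rw [h, PySem.Dict.items_counter, pvTally, PySem.List.dedup_eq_ofList]

theorem foldl_inc_label (uas : List String) (rules : List (String × String)) (dflt : String) :
    uas.foldl (fun d ua => pvInc d (pvLabel ua rules dflt)) PySem.Dict.empty
      = (uas.map (fun ua => pvLabel ua rules dflt)).foldl (fun d l => pvInc d l)
          PySem.Dict.empty := by
  rw [List.foldl_map]

-- ===== VERDICT (by name: the statement is the Claim_ definition above) =====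
theorem analyze_user_agents_py_spec : Claim_equal_analyze_user_agents_py := by
  intro visits _
  unfold Spec_analyze_user_agents_py analyze_user_agents_py analyze_user_agents_py_alt
  rw [foldA_split]
  simp only [foldl_inc_label, foldl_inc_items]
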